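-- pv_equiv track=rewrite | github.com/ratmeow/aeropupa | aerotools/detection/service.py | _pick_best_id
-- ===== SOURCE A (Python) =====
-- from typing import List, Dict, Tuple
--
-- def _pick_best_id(texts: List[str], min_len: int = 5) -> str:
--     candidates: List[str] = []
--
--     for raw in texts:
--         if len(raw) < min_len:
--             continue
--         if "-" not in raw:
--             continue
--         candidates.append(raw)
--
--     if not candidates:
--         return ""
--
--     return max(candidates, key=len)
-- ===== SOURCE B (Python) =====
-- def _pick_best_id(texts, min_len=5):
--     best = ""
--     best_len = -1
--     for raw in texts:
--         if len(raw) >= min_len and "-" in raw: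
--             l = len(raw)
--             if l > best_len:
--                 best = raw
--                 best_len = l
--     return best
-- ===== Notes on version B (the rewrite author's own statement) =====
-- stated objective: simpler
-- what changed: Replaces the candidates-list build plus separate max(key=len) scan with one fused pass keeping the current best string and its length (strict > preserves max's first-tie winner; empty best means no candidate).
import Mathlib
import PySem

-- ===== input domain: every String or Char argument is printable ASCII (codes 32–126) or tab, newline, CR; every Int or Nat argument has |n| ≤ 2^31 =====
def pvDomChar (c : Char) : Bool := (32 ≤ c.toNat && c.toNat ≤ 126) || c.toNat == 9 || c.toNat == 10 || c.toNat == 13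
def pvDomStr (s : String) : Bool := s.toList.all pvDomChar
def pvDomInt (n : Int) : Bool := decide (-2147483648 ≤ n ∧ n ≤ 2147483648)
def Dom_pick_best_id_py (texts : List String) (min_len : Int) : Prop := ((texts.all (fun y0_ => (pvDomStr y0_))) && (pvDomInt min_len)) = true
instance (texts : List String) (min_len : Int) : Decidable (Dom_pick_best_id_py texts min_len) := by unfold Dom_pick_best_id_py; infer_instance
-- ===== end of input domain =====

-- ===== PORT A =====
-- B fuses A's filter pass and max(key=len) scan into one loop keeping the best string; return value only.
def pick_best_id_py (texts : List String) (min_len : Int) : String :=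
  let candidates : List String := texts.foldl (fun acc raw =>
    if PySem.Str.len raw < min_len then acc
    else if !(PySem.Str.isIn "-" raw) then acc
    else acc ++ [raw]) []
  if candidates = [] then ""
  else (PySem.List.max? candidates (fun s => PySem.Str.len s)).getD ""

-- ===== PORT B =====
def pick_best_id_py_alt (texts : List String) (min_len : Int) : String :=
  (texts.foldl (fun (st : String × Int) raw =>
      if min_len ≤ PySem.Str.len raw ∧ PySem.Str.isIn "-" raw = true then
        let l := PySem.Str.len raw
        if st.2 < l then (raw, l) else st
      else st)
    ("", -1)).1

-- ===== PRECONDITION & SPEC =====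
def Spec_pick_best_id_py (texts : List String) (min_len : Int) (out : String) : Prop := out = pick_best_id_py_alt texts min_len
instance (texts : List String) (min_len : Int) (out : String) : Decidable (Spec_pick_best_id_py texts min_len out) := by unfold Spec_pick_best_id_py; infer_instance

-- ===== CLAIM (what is proved, stated in full; the proofs are below) =====
def Claim_equal_pick_best_id_py : Prop := ∀ (texts : List String) (min_len : Int), Dom_pick_best_id_py texts min_len → Spec_pick_best_id_py texts min_len (pick_best_id_py texts min_len)

-- ===== LEMMAS AND PROOFS =====

-- the Bool form of A's two 'continue' guards / B's single 'and' guard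
def pvKeep (min_len : Int) (raw : String) : Bool :=
  decide (min_len ≤ PySem.Str.len raw) && PySem.Str.isIn "-" raw

-- A's candidate-building loop is a filter
lemma candidates_eq_filter (texts : List String) (min_len : Int) (acc : List String) :
    texts.foldl (fun acc raw =>
      if PySem.Str.len raw < min_len then acc
      else if !(PySem.Str.isIn "-" raw) then acc
      else acc ++ [raw]) acc = acc ++ texts.filter (pvKeep min_len) := by
  induction texts generalizing acc with
  | nil => simp
  | cons x t ih =>
    simp only [List.foldl_cons, List.filter_cons]
    by_cases h1 : PySem.Str.len x < min_len
    · have h1' : ¬ min_len ≤ (x.length : Int) := not_le.mpr h1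
      have hk : pvKeep min_len x = false := by
        simp [pvKeep, PySem.Str.len, h1']
      rw [if_pos h1, hk]
      simp only [Bool.false_eq_true, if_false]
      exact ih acc
    · by_cases h2 : PySem.Str.isIn "-" x = true
      · have hk : pvKeep min_len x = true := by
          simp only [pvKeep, Bool.and_eq_true]
          exact ⟨decide_eq_true (not_lt.mp h1), h2⟩
        rw [if_neg h1, h2, hk]
        simp only [Bool.not_true, Bool.false_eq_true, if_false, if_pos rfl]
        rw [ih (acc ++ [x]), List.append_assoc]
        rfl
      · rw [Bool.not_eq_true] at h2
        have h2' : PySem.Chars.isIn ['-'] x.toList = false := by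
          simpa [PySem.Str.isIn] using h2
        have hk : pvKeep min_len x = false := by
          simp [pvKeep, PySem.Str.isIn, h2']
        rw [if_neg h1, h2, hk]
        simp only [Bool.not_false, if_true, Bool.false_eq_true, if_false]
        exact ih acc

-- invariant linking A's running max (as an Option) with B's (best, best_len) pair
def pvRel (acc : Option String) (st : String × Int) : Prop :=
  (acc = none ∧ st = ("", -1)) ∨ (∃ m, acc = some m ∧ st = (m, PySem.Str.len m))

lemma fuse (min_len : Int) (texts : List String) (acc : Option String) (st : String × Int)
    (h : pvRel acc st) :
    pvRel
      ((texts.filter (pvKeep min_len)).foldl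
        (fun acc x =>
          match acc with
          | none => some x
          | some m => if PySem.Str.len m < PySem.Str.len x then some x else some m) acc)
      (texts.foldl (fun (st : String × Int) raw =>
        if min_len ≤ PySem.Str.len raw ∧ PySem.Str.isIn "-" raw = true then
          let l := PySem.Str.len raw
          if st.2 < l then (raw, l) else st
        else st) st) := by
  induction texts generalizing acc st with
  | nil => simpa using h
  | cons x t ih =>
    simp only [List.filter_cons, List.foldl_cons]
    by_cases hk : pvKeep min_len x = true
    · have hk' : min_len ≤ PySem.Str.len x ∧ PySem.Str.isIn "-" x = true := by
        simpa [pvKeep] using hk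
      simp only [hk, if_pos hk', List.foldl_cons]
      rcases h with ⟨ha, hs⟩ | ⟨m, ha, hs⟩
      · subst ha; subst hs
        have hx : (-1 : Int) < PySem.Str.len x := by
          have h0 : (0 : Int) ≤ PySem.Str.len x := by simp [PySem.Str.len]
          omega
        refine ih _ _ (Or.inr ⟨x, rfl, ?_⟩)
        show (if (-1 : Int) < PySem.Str.len x then (x, PySem.Str.len x) else ("", -1)) = (x, PySem.Str.len x)
        rw [if_pos hx]
      · subst ha; subst hs
        by_cases hlt : PySem.Str.len m < PySem.Str.len x
        · refine ih _ _ (Or.inr ⟨x, ?_, ?_⟩)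
          · show (if PySem.Str.len m < PySem.Str.len x then some x else some m) = some x
            rw [if_pos hlt]
          · show (if PySem.Str.len m < PySem.Str.len x then (x, PySem.Str.len x) else (m, PySem.Str.len m)) = (x, PySem.Str.len x)
            rw [if_pos hlt]
        · refine ih _ _ (Or.inr ⟨m, ?_, ?_⟩)
          · show (if PySem.Str.len m < PySem.Str.len x then some x else some m) = some m
            rw [if_neg hlt]
          · show (if PySem.Str.len m < PySem.Str.len x then (x, PySem.Str.len x) else (m, PySem.Str.len m)) = (m, PySem.Str.len m)
            rw [if_neg hlt]
    · have hk' : ¬ (min_len ≤ PySem.Str.len x ∧ PySem.Str.isIn "-" x = true) := by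
        simpa [pvKeep] using hk
      simp only [hk, if_neg hk']
      exact ih _ _ h

-- ===== VERDICT (by name: the statement is the Claim_ definition above) =====
theorem pick_best_id_py_spec : Claim_equal_pick_best_id_py := by
  intro texts min_len _
  unfold Spec_pick_best_id_py pick_best_id_py pick_best_id_py_alt
  have hc := candidates_eq_filter texts min_len []
  simp only [List.nil_append] at hc
  rw [hc]
  have hmax : PySem.List.max? (texts.filter (pvKeep min_len)) (fun s => PySem.Str.len s) =
      (texts.filter (pvKeep min_len)).foldl
        (fun acc x =>
          match acc with
          | none => some x
          | some m => if PySem.Str.len m < PySem.Str.len x then some x else some m) none := by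
    unfold PySem.List.max?
    congr 1
    funext acc x
    cases acc <;> rfl
  have hf := fuse min_len texts none ("", -1) (Or.inl ⟨rfl, rfl⟩)
  rcases hf with ⟨ha, hs⟩ | ⟨m, ha, hs⟩
  · have hnil : texts.filter (pvKeep min_len) = [] :=
      (PySem.List.max?_eq_none_iff _ _).mp (hmax.trans ha)
    rw [hs]
    simp [hnil]
  · have hne : texts.filter (pvKeep min_len) ≠ [] := by
      intro h0
      rw [h0] at ha
      simp only [List.foldl_nil] at ha
      exact absurd ha (by simp)
    rw [if_neg hne, hmax, ha, hs]
    rfl
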